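-- pv_equiv track=rewrite | github.com/shreshthgandhi/DNA_Seq2Seq | utils.py | num_to_string
-- ===== SOURCE A (Python) =====
-- def num_to_string(num_list):
--     string_list = []
--     char_dict = {0:'A',1:'G',2:'C',3:'T',4:' ',5:'|',6:' ',7:' '}
--     for num in num_list:
--         if num == 6:
--             break
--         char = char_dict[num]
--         string_list.append(char)
--     if not string_list:
--         string_list.append(' ')
--     return ''.join(string_list)
-- ===== SOURCE B (Python) =====
-- def num_to_string(num_list):
--     char_dict = {0: 'A', 1: 'G', 2: 'C', 3: 'T', 4: ' ', 5: '|', 6: ' ', 7: ' '}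
--     try:
--         cut = num_list.index(6)
--     except ValueError:
--         cut = len(num_list)
--     result = ''.join(char_dict[n] for n in num_list[:cut])
--     return result if result else ' '
-- ===== Notes on version B (the rewrite author's own statement) =====
-- stated objective: alternative
-- what changed: Replaces the fused map-with-break loop by a two-phase shape: locate the first 6 with list.index (falling back to len on ValueError), then translate the prefix slice in a separate join pass, then apply the empty->' ' rule.
import Mathlib
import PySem

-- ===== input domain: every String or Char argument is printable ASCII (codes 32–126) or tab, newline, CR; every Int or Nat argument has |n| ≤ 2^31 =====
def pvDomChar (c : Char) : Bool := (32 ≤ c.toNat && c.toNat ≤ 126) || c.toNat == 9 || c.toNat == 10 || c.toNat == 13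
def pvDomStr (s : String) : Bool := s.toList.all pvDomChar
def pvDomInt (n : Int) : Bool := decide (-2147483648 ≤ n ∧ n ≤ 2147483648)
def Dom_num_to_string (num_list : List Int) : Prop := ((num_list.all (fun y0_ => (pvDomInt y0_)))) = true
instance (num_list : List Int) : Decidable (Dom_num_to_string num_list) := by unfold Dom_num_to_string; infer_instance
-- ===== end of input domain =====

-- B replaces A's fused map-with-break loop by a find-cutoff-then-translate two-phase shape (alternative decomposition, same cost).

-- ===== PORT A =====
-- char_dict = {0:'A',1:'G',2:'C',3:'T',4:' ',5:'|',6:' ',7:' '} (shared by both ports, as in both Pythons)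
def pvCharDict : PySem.Dict Int Char :=
  PySem.Dict.ofList [(0, 'A'), (1, 'G'), (2, 'C'), (3, 'T'), (4, ' '), (5, '|'), (6, ' '), (7, ' ')]

-- the 'for num in num_list' loop with the break; the 'none' branch is Python's KeyError (excluded by Pre_)
def numToStringGo : List Int → List Char → List Char
  | [], string_list => string_list
  | num :: rest, string_list =>
    if num == 6 then string_list
    else match pvCharDict.get? num with
      | some char => numToStringGo rest (string_list ++ [char])
      | none => string_list  -- KeyError: outside Pre_

def num_to_string (num_list : List Int) : String :=
  let string_list := numToStringGo num_list []
  let string_list := if string_list.isEmpty then [' '] else string_list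
  String.ofList string_list

-- ===== PORT B =====
def num_to_string_alt (num_list : List Int) : String :=
  let cut : Nat := match PySem.List.index? num_list 6 with
    | some i => i
    | none => num_list.length
  let result := String.ofList ((PySem.List.slice num_list none (some (cut : Int))).map
    (fun n => (pvCharDict.get? n).getD ' '))   -- getD's default never used: KeyError is outside Pre_
  if PySem.Str.len result == 0 then " " else result   -- 'result if result else " "'

-- ===== PRECONDITION & SPEC =====
-- Pre_ excludes exactly the inputs on which A raises KeyError: a value outside the dict's
-- keys 0..7 occurring before the first 6 (B raises KeyError on the same inputs).
def Pre_num_to_string (num_list : List Int) : Prop :=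
  ∀ n ∈ num_list.takeWhile (fun n => n != 6), 0 ≤ n ∧ n ≤ 7
instance (num_list : List Int) : Decidable (Pre_num_to_string num_list) := by
  unfold Pre_num_to_string; infer_instance

def pvWitness_num_to_string : List Int := [0, 1, 2, 5, 3, 6, 99]

def Spec_num_to_string (num_list : List Int) (out : String) : Prop := out = num_to_string_alt num_list
instance (num_list : List Int) (out : String) : Decidable (Spec_num_to_string num_list out) := by unfold Spec_num_to_string; infer_instance

-- ===== CLAIM (what is proved, stated in full; the proofs are below) =====
def Claim_equal_num_to_string : Prop := ∀ (num_list : List Int), Dom_num_to_string num_list → Pre_num_to_string num_list → Spec_num_to_string num_list (num_to_string num_list)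

-- ===== LEMMAS AND PROOFS =====

def pvF (n : Int) : Char := (pvCharDict.get? n).getD ' '

theorem pvGet?_eq (n : Int) (h0 : 0 ≤ n) (h7 : n ≤ 7) :
    pvCharDict.get? n = some (pvF n) := by
  interval_cases n <;> decide

theorem pvGo_eq (l : List Int) (acc : List Char)
    (h : ∀ n ∈ l.takeWhile (fun n => n != 6), 0 ≤ n ∧ n ≤ 7) :
    numToStringGo l acc = acc ++ (l.takeWhile (fun n => n != 6)).map pvF := by
  induction l generalizing acc with
  | nil => simp [numToStringGo]
  | cons x rest ih =>
    by_cases hx : x = 6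
    · subst hx; simp [numToStringGo, List.takeWhile]
    · have hxne : (x != 6) = true := by simp [hx]
      obtain ⟨h0, h7⟩ := h x (by simp [List.takeWhile, hxne])
      have hrest : ∀ n ∈ rest.takeWhile (fun n => n != 6), 0 ≤ n ∧ n ≤ 7 := by
        intro n hn
        refine h n ?_
        simp only [List.takeWhile, hxne]
        exact List.mem_cons_of_mem _ hn
      simp only [numToStringGo, List.takeWhile, hxne, pvGet?_eq x h0 h7]
      rw [if_neg (by simpa using hx), ih _ hrest]
      simp [pvF]

theorem pvCut_eq (l : List Int) :
    PySem.List.slice l none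
        (some (((match PySem.List.index? l 6 with | some i => i | none => l.length) : Nat) : Int))
      = l.takeWhile (fun n => n != 6) := by
  rw [PySem.List.slice_to_natCast]
  cases hidx : PySem.List.index? l 6 with
  | none =>
    have h6 : (6 : Int) ∉ l := (PySem.List.index?_eq_none_iff l 6).mp hidx
    simp only [List.take_length]
    symm
    apply List.takeWhile_eq_self_iff.mpr
    intro n hn
    simp only [bne_iff_ne, ne_eq]
    exact fun he => h6 (he ▸ hn)
  | some k =>
    obtain ⟨pre, suf, hl, hlen, hnotin⟩ := (PySem.List.index?_eq_some_iff l 6 k).mp hidx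
    subst hl
    have hpre : ∀ n ∈ pre, (fun n => n != 6) n = true := by
      intro n hn; simp only [bne_iff_ne, ne_eq]
      exact fun he => hnotin (he ▸ hn)
    have htw_pre : List.takeWhile (fun n => n != 6) pre = pre :=
      List.takeWhile_eq_self_iff.mpr hpre
    rw [← hlen, List.take_append_of_le_length (le_refl _), List.take_length,
      List.takeWhile_append, if_pos (by rw [htw_pre])]
    simp [List.takeWhile]

-- ===== VERDICT (by name: the statement is the Claim_ definition above) =====
theorem num_to_string_spec : Claim_equal_num_to_string := by
  intro l _ hpre
  simp only [Spec_num_to_string, num_to_string, num_to_string_alt]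
  rw [pvGo_eq l [] hpre, pvCut_eq l, List.nil_append]
  cases htw : l.takeWhile (fun n => n != 6) with
  | nil => simp
  | cons c cs =>
    have hA : (List.map pvF (c :: cs)).isEmpty ≠ true := by simp
    have hB : (PySem.Str.len (String.ofList
        (List.map (fun n => (pvCharDict.get? n).getD ' ') (c :: cs))) == 0) ≠ true := by
      simp [PySem.Str.len]
      all_goals omega
    rw [if_neg hA, if_neg hB]
    rfl
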